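-- pv_equiv track=rewrite | github.com/thanhbinhnd2002/multi-agent-streamlit-method3 | Simulate/multi_Beta_Simulate_Pair.py | compute_total_support
-- ===== SOURCE A (Python) =====
-- def compute_total_support(x_state, alpha_indices):
--     support_dict = {}
--     for alpha_idx in alpha_indices:
--         support = 0
--         for j in range(len(x_state)):
--             if j == alpha_idx:
--                 continue
--             if x_state[j] > 0:
--                 support += 1
--             elif x_state[j] < 0:
--                 support -= 1
--         support_dict[alpha_idx] = support
--     return support_dict
-- ===== SOURCE B (Python) =====
-- def _sign(x):
--     return 1 if x > 0 else (-1 if x < 0 else 0)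
--
-- def compute_total_support(x_state, alpha_indices):
--     total = 0
--     for x in x_state:
--         total += _sign(x)
--     n = len(x_state)
--     return {a: total - (_sign(x_state[a]) if 0 <= a < n else 0) for a in alpha_indices}
-- ===== Notes on version B (the rewrite author's own statement) =====
-- stated objective: faster
-- what changed: B computes the sign-sum of x_state once and derives each index's support as total minus the sign at that index (when in range), replacing A's inner scan over the whole list for every alpha index.
import Mathlib
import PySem

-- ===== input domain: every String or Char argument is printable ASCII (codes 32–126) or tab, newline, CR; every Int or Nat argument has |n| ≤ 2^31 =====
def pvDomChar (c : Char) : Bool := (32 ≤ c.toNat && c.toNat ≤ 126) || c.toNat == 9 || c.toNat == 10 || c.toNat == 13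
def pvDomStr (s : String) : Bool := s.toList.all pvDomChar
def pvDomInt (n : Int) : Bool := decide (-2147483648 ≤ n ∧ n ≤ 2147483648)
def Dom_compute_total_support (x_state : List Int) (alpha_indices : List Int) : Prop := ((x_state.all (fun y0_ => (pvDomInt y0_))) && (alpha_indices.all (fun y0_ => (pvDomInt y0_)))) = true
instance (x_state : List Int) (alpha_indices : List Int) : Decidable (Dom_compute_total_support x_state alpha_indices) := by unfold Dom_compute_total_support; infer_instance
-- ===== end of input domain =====

-- B replaces A's per-index rescans by one precomputed sign-sum minus the sign at the index: O(n+k) vs O(k*n).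


-- ===== PORT A =====
def compute_total_support (x_state : List Int) (alpha_indices : List Int) : List (Int × Int) :=
  (alpha_indices.foldl (fun (d : PySem.Dict Int Int) alpha_idx =>
      d.insert alpha_idx
        ((PySem.List.pyRange 0 x_state.length 1).foldl (fun support j =>
          if j = alpha_idx then support
          else if PySem.List.pyGetD x_state j 0 > 0 then support + 1
          else if PySem.List.pyGetD x_state j 0 < 0 then support - 1
          else support) 0))
    PySem.Dict.empty).items

-- ===== PORT B =====
def pySign (x : Int) : Int := if x > 0 then 1 else if x < 0 then -1 else 0

def compute_total_support_alt (x_state : List Int) (alpha_indices : List Int) : List (Int × Int) :=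
  let total := x_state.foldl (fun s x => s + pySign x) 0
  let n : Int := x_state.length
  (alpha_indices.foldl (fun (d : PySem.Dict Int Int) a =>
      d.insert a (total - (if 0 ≤ a ∧ a < n then pySign (PySem.List.pyGetD x_state a 0) else 0)))
    PySem.Dict.empty).items

-- ===== PRECONDITION & SPEC =====
def Spec_compute_total_support (x_state : List Int) (alpha_indices : List Int) (out : List (Int × Int)) : Prop := out = compute_total_support_alt x_state alpha_indices
instance (x_state : List Int) (alpha_indices : List Int) (out : List (Int × Int)) : Decidable (Spec_compute_total_support x_state alpha_indices out) := by unfold Spec_compute_total_support; infer_instance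

-- ===== CLAIM (what is proved, stated in full; the proofs are below) =====
def Claim_equal_compute_total_support : Prop := ∀ (x_state : List Int) (alpha_indices : List Int), Dom_compute_total_support x_state alpha_indices → Spec_compute_total_support x_state alpha_indices (compute_total_support x_state alpha_indices)

-- ===== LEMMAS AND PROOFS =====

-- counting with one index skipped, as a sum over range
lemma skip_sum (xs : List Int) (a : Int) (n : Nat) :
    ((PySem.List.pyRange 0 (n:Int) 1).map (fun j => if j = a then 0 else pySign (PySem.List.pyGetD xs j 0))).sum
    = ((PySem.List.pyRange 0 (n:Int) 1).map (fun j => pySign (PySem.List.pyGetD xs j 0))).sum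
      - (if 0 ≤ a ∧ a < (n:Int) then pySign (PySem.List.pyGetD xs a 0) else 0) := by
  induction n with
  | zero =>
    have : ¬ ((0:Int) ≤ a ∧ a < 0) := by omega
    simp [PySem.List.pyRange_one_eq_nil, this]
  | succ m ih =>
    have hcast : (((m+1:Nat)):Int) = (m:Int) + 1 := by push_cast; ring
    rw [hcast, PySem.List.pyRange_one_succ_right (by positivity)]
    simp only [List.map_append, List.sum_append, List.map_cons, List.map_nil, List.sum_cons,
      List.sum_nil, ih]
    by_cases h : (m:Int) = a
    · have h1 : ¬ ((0:Int) ≤ a ∧ a < (m:Int)) := by omega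
      have h2 : (0:Int) ≤ a ∧ a < (m:Int) + 1 := by omega
      rw [if_pos h, if_neg h1, if_pos h2, ← h]
      ring
    · have h3 : ((0:Int) ≤ a ∧ a < (m:Int) + 1) ↔ ((0:Int) ≤ a ∧ a < (m:Int)) := by
        constructor <;> (intro hh; omega)
      rw [if_neg h, if_congr h3 rfl rfl]
      split_ifs <;> ring

-- A's inner scan over range(len) with index a skipped equals B's precomputed total minus the in-range sign correction.
lemma inner_eq (xs : List Int) (a : Int) :
    (PySem.List.pyRange 0 xs.length 1).foldl (fun support j =>
        if j = a then support
        else if PySem.List.pyGetD xs j 0 > 0 then support + 1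
        else if PySem.List.pyGetD xs j 0 < 0 then support - 1
        else support) 0
    = xs.foldl (fun s x => s + pySign x) 0
      - (if 0 ≤ a ∧ a < (xs.length : Int) then pySign (PySem.List.pyGetD xs a 0) else 0) := by
  have hA : (fun (support : Int) (j : Int) =>
        if j = a then support
        else if PySem.List.pyGetD xs j 0 > 0 then support + 1
        else if PySem.List.pyGetD xs j 0 < 0 then support - 1
        else support)
      = (fun support j => support + (if j = a then 0 else pySign (PySem.List.pyGetD xs j 0))) := by
    funext s j
    simp only [pySign]
    split_ifs <;> ring
  rw [hA, PySem.List.foldl_add, PySem.List.foldl_add, skip_sum xs a xs.length]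
  have : (PySem.List.pyRange 0 (xs.length:Int) 1).map (fun j => pySign (PySem.List.pyGetD xs j 0))
      = xs.map pySign := by
    rw [show (fun j => pySign (PySem.List.pyGetD xs j 0)) = pySign ∘ (fun j => PySem.List.pyGetD xs j 0) from rfl,
      ← List.map_map, PySem.List.map_pyGetD_pyRange_zero']
  rw [this]
  ring

-- ===== VERDICT (by name: the statement is the Claim_ definition above) =====
theorem compute_total_support_spec : Claim_equal_compute_total_support := by
  intro xs al _
  unfold Spec_compute_total_support compute_total_support compute_total_support_alt
  simp only []
  congr 2
  funext d a
  rw [inner_eq]
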